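-- pv_equiv track=rewrite | github.com/KlaraHajdu/TW4_2048 | 2048_with_colors_Abel_Kl.py | can_move
-- ===== SOURCE A (Python) =====
-- def can_move(tiles):
--     dir_string = []
--     can_move = [False, False, False, False]
--     for dir in ["UP_DOWN", "LEFT_RIGHT"]:
--         x_offset = 1 if dir == "UP_DOWN" else 0
--         y_offset = 0 if dir == "UP_DOWN" else 1
--         vertical = 0 if dir == "UP_DOWN" else 2
--         for row_col_1 in range(4):
--             for row_col_2 in range(3):
--                 y = row_col_1 if dir == "UP_DOWN" else row_col_2
--                 x = row_col_2 if dir == "UP_DOWN" else row_col_1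
--                 if tiles[x + x_offset][y + y_offset] != 0 and tiles[x][y] == 0:
--                     can_move[0 + vertical] = True
--                 if tiles[x][y] != 0 and tiles[x + x_offset][y + y_offset] == 0:
--                     can_move[1 + vertical] = True
--                 if tiles[x][y] == tiles[x + x_offset][y + y_offset] and tiles[x][y] != 0:
--                     can_move[0 + vertical] = True
--                     can_move[1 + vertical] = True
--
--     for i in range(4):
--         if can_move[i]:
--             if i == 0:
--                 dir_string.append("UP")
--             if i == 1:
--                 dir_string.append("DOWN")
--             if i == 2:
--                 dir_string.append("LEFT")
--             if i == 3:
--                 dir_string.append("RIGHT")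
--
--     return dir_string
-- ===== SOURCE B (Python) =====
-- def can_move(tiles):
--     # Simulate the actual 2048 slide of each line and test whether it changes it:
--     # a direction is legal iff sliding some line toward it alters that line.
--     def slide(line):
--         xs = [v for v in line if v != 0]
--         merged = []
--         while xs:
--             if len(xs) >= 2 and xs[0] == xs[1]:
--                 merged.append(2 * xs[0])
--                 xs = xs[2:]
--             else:
--                 merged.append(xs[0])
--                 xs = xs[1:]
--         return merged + [0] * (len(line) - len(merged))
--
--     def moves(line):
--         return slide(line) != line
--
--     rows = [row[:4] for row in tiles[:4]]
--     cols = [[row[j] for row in rows] for j in range(4)]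
--     out = []
--     if any(moves(c) for c in cols):
--         out.append("UP")
--     if any(moves(c[::-1]) for c in cols):
--         out.append("DOWN")
--     if any(moves(r) for r in rows):
--         out.append("LEFT")
--     if any(moves(r[::-1]) for r in rows):
--         out.append("RIGHT")
--     return out
-- ===== Notes on version B (the rewrite author's own statement) =====
-- stated objective: alternative
-- what changed: B abandons A's flag-setting pair scan entirely: it simulates the actual 2048 slide of each row/column (filter out zeros, merge equal adjacent tiles, pad with zeros) and declares a direction legal iff the slide changes some line, checking DOWN/RIGHT by sliding the reversed line.
import Mathlib
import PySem

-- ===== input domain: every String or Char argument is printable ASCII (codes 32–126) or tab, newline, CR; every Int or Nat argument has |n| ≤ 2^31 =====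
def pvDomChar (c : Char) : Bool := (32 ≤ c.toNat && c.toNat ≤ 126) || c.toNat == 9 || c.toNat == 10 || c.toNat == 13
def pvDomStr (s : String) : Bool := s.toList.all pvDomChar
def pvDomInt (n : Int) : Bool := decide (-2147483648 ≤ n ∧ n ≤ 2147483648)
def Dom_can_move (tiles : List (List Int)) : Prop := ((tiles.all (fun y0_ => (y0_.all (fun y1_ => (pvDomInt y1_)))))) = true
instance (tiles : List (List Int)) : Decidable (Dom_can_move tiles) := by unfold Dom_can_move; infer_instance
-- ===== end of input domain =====

-- B replaces A's flag-setting pair scan by simulating the actual 2048 slide of each line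
-- (drop zeros, merge equal adjacent tiles, pad) and testing whether the line changes
-- (objective: alternative algorithm, same cost).

-- ===== PORT A =====
-- literal transliteration of A's nested loops; each Python loop is a named fold over the same state
def aPairStep (tiles : List (List Int)) (x_offset y_offset vertical : Int) (dir : String)
    (rc1 : Int) (cm : List Bool) (rc2 : Int) : List Bool :=
  let y : Int := if dir = "UP_DOWN" then rc1 else rc2
  let x : Int := if dir = "UP_DOWN" then rc2 else rc1
  let cm := if PySem.List.pyGetD (PySem.List.pyGetD tiles (x + x_offset) []) (y + y_offset) 0 ≠ 0 ∧
               PySem.List.pyGetD (PySem.List.pyGetD tiles x []) y 0 = 0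
            then PySem.List.pySetD cm (0 + vertical) true else cm
  let cm := if PySem.List.pyGetD (PySem.List.pyGetD tiles x []) y 0 ≠ 0 ∧
               PySem.List.pyGetD (PySem.List.pyGetD tiles (x + x_offset) []) (y + y_offset) 0 = 0
            then PySem.List.pySetD cm (1 + vertical) true else cm
  if PySem.List.pyGetD (PySem.List.pyGetD tiles x []) y 0 =
       PySem.List.pyGetD (PySem.List.pyGetD tiles (x + x_offset) []) (y + y_offset) 0 ∧
     PySem.List.pyGetD (PySem.List.pyGetD tiles x []) y 0 ≠ 0
  then PySem.List.pySetD (PySem.List.pySetD cm (0 + vertical) true) (1 + vertical) true else cm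

def aLine (tiles : List (List Int)) (x_offset y_offset vertical : Int) (dir : String)
    (cm : List Bool) (rc1 : Int) : List Bool :=
  (PySem.List.pyRange 0 3 1).foldl (aPairStep tiles x_offset y_offset vertical dir rc1) cm

def aDir (tiles : List (List Int)) (cm : List Bool) (dir : String) : List Bool :=
  let x_offset : Int := if dir = "UP_DOWN" then 1 else 0
  let y_offset : Int := if dir = "UP_DOWN" then 0 else 1
  let vertical : Int := if dir = "UP_DOWN" then 0 else 2
  (PySem.List.pyRange 0 4 1).foldl (aLine tiles x_offset y_offset vertical dir) cm

def aOut (cm : List Bool) : List String :=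
  (PySem.List.pyRange 0 4 1).foldl (fun ds i =>
    if PySem.List.pyGetD cm i false then
      let ds := if i = 0 then ds ++ ["UP"] else ds
      let ds := if i = 1 then ds ++ ["DOWN"] else ds
      let ds := if i = 2 then ds ++ ["LEFT"] else ds
      if i = 3 then ds ++ ["RIGHT"] else ds
    else ds) []

def can_move (tiles : List (List Int)) : List String :=
  aOut (["UP_DOWN", "LEFT_RIGHT"].foldl (aDir tiles) [false, false, false, false])

-- ===== PORT B =====
-- Source B's merge while-loop: consume one or two leading tiles of the zero-free list per step
def bMerge : List Int → List Int
  | [] => []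
  | [x] => [x]
  | x :: y :: t => if x = y then (2 * x) :: bMerge t else x :: bMerge (y :: t)

-- Source B's slide: drop zeros, merge, pad back to the original length with zeros
def bSlide (line : List Int) : List Int :=
  let m := bMerge (line.filter (fun v => v ≠ 0))
  m ++ List.replicate (line.length - m.length) 0

def bMoves (line : List Int) : Bool := bSlide line != line

def can_move_alt (tiles : List (List Int)) : List String :=
  let rows := (PySem.List.slice tiles none (some 4)).map (fun row => PySem.List.slice row none (some 4))
  let cols := (PySem.List.pyRange 0 4 1).map (fun j => rows.map (fun row => PySem.List.pyGetD row j 0))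
  let out : List String := []
  let out := if cols.any bMoves then out ++ ["UP"] else out
  let out := if cols.any (fun c => bMoves c.reverse) then out ++ ["DOWN"] else out
  let out := if rows.any bMoves then out ++ ["LEFT"] else out
  if rows.any (fun r => bMoves r.reverse) then out ++ ["RIGHT"] else out

-- ===== PRECONDITION & SPEC =====
-- Pre_ excludes exactly the inputs where A raises IndexError: boards with fewer than 4 rows or a
-- row among the first four with fewer than 4 entries.
def Pre_can_move (tiles : List (List Int)) : Prop :=
  4 ≤ tiles.length ∧ ∀ r ∈ tiles.take 4, 4 ≤ r.length
instance (tiles : List (List Int)) : Decidable (Pre_can_move tiles) := by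
  unfold Pre_can_move; infer_instance
def pvWitness_can_move : List (List Int) :=
  [[0, 2, 0, 0], [0, 0, 4, 0], [0, 0, 0, 0], [2, 0, 0, 2]]

def Spec_can_move (tiles : List (List Int)) (out : List String) : Prop := out = can_move_alt tiles
instance (tiles : List (List Int)) (out : List String) : Decidable (Spec_can_move tiles out) := by
  unfold Spec_can_move; infer_instance

-- ===== CLAIM (what is proved, stated in full; the proofs are below) =====
def Claim_equal_can_move : Prop := ∀ (tiles : List (List Int)), Dom_can_move tiles →
  Pre_can_move tiles → Spec_can_move tiles (can_move tiles)

-- ===== LEMMAS AND PROOFS =====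

-- proof-side abbreviations describing A's pair scan: a single board access, one board line,
-- and the (toward_low, toward_high) pair-scan fold A's flag updates amount to
def ag (tiles : List (List Int)) (x y : Int) : Int :=
  PySem.List.pyGetD (PySem.List.pyGetD tiles x []) y 0

def colL (tiles : List (List Int)) (y : Int) : List Int :=
  [ag tiles 0 y, ag tiles 1 y, ag tiles 2 y, ag tiles 3 y]

def rowL (tiles : List (List Int)) (x : Int) : List Int :=
  [ag tiles x 0, ag tiles x 1, ag tiles x 2, ag tiles x 3]

def csStep (p : Bool × Bool) (ab : Int × Int) : Bool × Bool :=
  let lo := if ab.2 ≠ 0 ∧ ab.1 = 0 then true else p.1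
  let hi := if ab.1 ≠ 0 ∧ ab.2 = 0 then true else p.2
  if ab.1 = ab.2 ∧ ab.1 ≠ 0 then (true, true) else (lo, hi)

def csF (line : List Int) (p : Bool × Bool) : Bool × Bool :=
  (line.zip (PySem.List.slice line (some 1) none)).foldl csStep p

def pairScan (line : List Int) : Bool × Bool := csF line (false, false)

theorem csStep_or (p : Bool × Bool) (q : Int × Int) :
    csStep p q = (p.1 || (csStep (false, false) q).1, p.2 || (csStep (false, false) q).2) := by
  simp only [csStep]
  split_ifs <;> simp

theorem foldl_csStep_or (ps : List (Int × Int)) (p : Bool × Bool) :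
    ps.foldl csStep p =
      (p.1 || (ps.foldl csStep (false, false)).1, p.2 || (ps.foldl csStep (false, false)).2) := by
  induction ps generalizing p with
  | nil => simp
  | cons q ps ih =>
    simp only [List.foldl_cons]
    rw [ih (csStep p q), ih (csStep (false, false) q), csStep_or p q]
    simp [Bool.or_assoc]

theorem csF_or (line : List Int) (p : Bool × Bool) :
    csF line p = (p.1 || (pairScan line).1, p.2 || (pairScan line).2) := by
  exact foldl_csStep_or _ p

theorem pairUD (tiles : List (List Int)) (y : Int) (u d l r : Bool) (rc2 : Int) :
    aPairStep tiles 1 0 0 "UP_DOWN" y [u, d, l, r] rc2 =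
      [(csStep (u, d) (ag tiles rc2 y, ag tiles (rc2 + 1) y)).1,
       (csStep (u, d) (ag tiles rc2 y, ag tiles (rc2 + 1) y)).2, l, r] := by
  simp only [aPairStep, csStep, ag, add_zero]
  split_ifs <;>
    simp_all [PySem.List.pySetD, PySem.List.pySet?, PySem.List.pyIdx?]

theorem pairLR (tiles : List (List Int)) (x : Int) (u d l r : Bool) (rc2 : Int) :
    aPairStep tiles 0 1 2 "LEFT_RIGHT" x [u, d, l, r] rc2 =
      [u, d, (csStep (l, r) (ag tiles x rc2, ag tiles x (rc2 + 1))).1,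
       (csStep (l, r) (ag tiles x rc2, ag tiles x (rc2 + 1))).2] := by
  simp only [aPairStep, csStep, ag, add_zero]
  have hne : ("LEFT_RIGHT" : String) ≠ "UP_DOWN" := by decide
  simp only [if_neg hne]
  split_ifs <;>
    simp_all [PySem.List.pySetD, PySem.List.pySet?, PySem.List.pyIdx?]

theorem lineUD (tiles : List (List Int)) (y : Int) (u d l r : Bool) :
    aLine tiles 1 0 0 "UP_DOWN" [u, d, l, r] y =
      [(csF (colL tiles y) (u, d)).1, (csF (colL tiles y) (u, d)).2, l, r] := by
  have hr3 : PySem.List.pyRange 0 3 1 = [0, 1, 2] := by decide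
  simp [aLine, hr3, pairUD, csF, colL, PySem.List.slice_from_one]

theorem lineLR (tiles : List (List Int)) (x : Int) (u d l r : Bool) :
    aLine tiles 0 1 2 "LEFT_RIGHT" [u, d, l, r] x =
      [u, d, (csF (rowL tiles x) (l, r)).1, (csF (rowL tiles x) (l, r)).2] := by
  have hr3 : PySem.List.pyRange 0 3 1 = [0, 1, 2] := by decide
  simp [aLine, hr3, pairLR, csF, rowL, PySem.List.slice_from_one]

theorem dirUD (tiles : List (List Int)) (u d l r : Bool) :
    aDir tiles [u, d, l, r] "UP_DOWN" =
      [(csF (colL tiles 3) (csF (colL tiles 2) (csF (colL tiles 1) (csF (colL tiles 0) (u, d))))).1,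
       (csF (colL tiles 3) (csF (colL tiles 2) (csF (colL tiles 1) (csF (colL tiles 0) (u, d))))).2,
       l, r] := by
  have hr4 : PySem.List.pyRange 0 4 1 = [0, 1, 2, 3] := by decide
  simp [aDir, hr4, lineUD]

theorem dirLR (tiles : List (List Int)) (u d l r : Bool) :
    aDir tiles [u, d, l, r] "LEFT_RIGHT" =
      [u, d,
       (csF (rowL tiles 3) (csF (rowL tiles 2) (csF (rowL tiles 1) (csF (rowL tiles 0) (l, r))))).1,
       (csF (rowL tiles 3) (csF (rowL tiles 2) (csF (rowL tiles 1) (csF (rowL tiles 0) (l, r))))).2] := by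
  have hr4 : PySem.List.pyRange 0 4 1 = [0, 1, 2, 3] := by decide
  simp [aDir, hr4, lineLR]

theorem csF4_fst (l0 l1 l2 l3 : List Int) :
    (csF l3 (csF l2 (csF l1 (csF l0 (false, false))))).1 =
      ((pairScan l0).1 || ((pairScan l1).1 || ((pairScan l2).1 || (pairScan l3).1))) := by
  simp [csF_or, Bool.or_assoc]

theorem csF4_snd (l0 l1 l2 l3 : List Int) :
    (csF l3 (csF l2 (csF l1 (csF l0 (false, false))))).2 =
      ((pairScan l0).2 || ((pairScan l1).2 || ((pairScan l2).2 || (pairScan l3).2))) := by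
  simp [csF_or, Bool.or_assoc]

-- the bridge between the two algorithms: on a 4-tile line, "the slide changes the line"
-- is exactly A's toward-low pair-scan flag (and, reversed, the toward-high flag)
set_option maxHeartbeats 4000000 in
theorem keyLo (a b c d : Int) : bMoves [a, b, c, d] = (pairScan [a, b, c, d]).1 := by
  by_cases ha : a = 0 <;> by_cases hb : b = 0 <;> by_cases hc : c = 0 <;> by_cases hd : d = 0 <;>
    by_cases hab : a = b <;> by_cases hbc : b = c <;> by_cases hcd : c = d <;>
    by_cases hac : a = c <;> by_cases hbd : b = d <;> by_cases had : a = d <;>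
    simp_all [bMoves, bSlide, bMerge, pairScan, csF, csStep, PySem.List.slice_from_one]

set_option maxHeartbeats 4000000 in
theorem keyHi (a b c d : Int) : bMoves [d, c, b, a] = (pairScan [a, b, c, d]).2 := by
  by_cases ha : a = 0 <;> by_cases hb : b = 0 <;> by_cases hc : c = 0 <;> by_cases hd : d = 0 <;>
    by_cases hab : a = b <;> by_cases hbc : b = c <;> by_cases hcd : c = d <;>
    by_cases hac : a = c <;> by_cases hbd : b = d <;> by_cases had : a = d <;>
    simp_all [bMoves, bSlide, bMerge, pairScan, csF, csStep, PySem.List.slice_from_one] <;>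
    (try (split_ifs <;> simp_all))

theorem keyRev (a b c d : Int) : bMoves ([a, b, c, d].reverse) = (pairScan [a, b, c, d]).2 := by
  have h : [a, b, c, d].reverse = [d, c, b, a] := by simp
  rw [h, keyHi]

theorem aOut_eq (u d l r : Bool) :
    aOut [u, d, l, r] =
      (let o : List String := []
       let o := if u then o ++ ["UP"] else o
       let o := if d then o ++ ["DOWN"] else o
       let o := if l then o ++ ["LEFT"] else o
       if r then o ++ ["RIGHT"] else o) := by
  cases u <;> cases d <;> cases l <;> cases r <;> decide

theorem len4_split {α : Type} (l : List α) (h : 4 ≤ l.length) :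
    ∃ a b c d t, l = a :: b :: c :: d :: t := by
  match l with
  | a :: b :: c :: d :: t => exact ⟨a, b, c, d, t, rfl⟩
  | [] | [_] | [_, _] | [_, _, _] => simp at h

theorem pyGetD0 {α : Type} (x0 : α) (t : List α) (d : α) :
    PySem.List.pyGetD (x0 :: t) 0 d = x0 := by simp [pysem]
theorem pyGetD1 {α : Type} (x0 x1 : α) (t : List α) (d : α) :
    PySem.List.pyGetD (x0 :: x1 :: t) 1 d = x1 := by simp [pysem]
theorem pyGetD2 {α : Type} (x0 x1 x2 : α) (t : List α) (d : α) :
    PySem.List.pyGetD (x0 :: x1 :: x2 :: t) 2 d = x2 := by simp [pysem]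
theorem pyGetD3 {α : Type} (x0 x1 x2 x3 : α) (t : List α) (d : α) :
    PySem.List.pyGetD (x0 :: x1 :: x2 :: x3 :: t) 3 d = x3 := by simp [pysem]

-- ===== VERDICT (by name: the statement is the Claim_ definition above) =====
set_option maxHeartbeats 2000000 in
theorem can_move_spec : Claim_equal_can_move := by
  intro tiles _ hpre
  obtain ⟨hlen, hrows⟩ := hpre
  obtain ⟨r0, r1, r2, r3, rest, rfl⟩ := len4_split tiles hlen
  obtain ⟨a00, a01, a02, a03, t0, rfl⟩ := len4_split r0 (hrows _ (by simp))
  obtain ⟨a10, a11, a12, a13, t1, rfl⟩ := len4_split r1 (hrows _ (by simp))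
  obtain ⟨a20, a21, a22, a23, t2, rfl⟩ := len4_split r2 (hrows _ (by simp))
  obtain ⟨a30, a31, a32, a33, t3, rfl⟩ := len4_split r3 (hrows _ (by simp))
  show can_move _ = can_move_alt _
  rw [can_move, List.foldl_cons, List.foldl_cons, List.foldl_nil, dirUD, dirLR, aOut_eq]
  rw [can_move_alt]
  have hr4 : PySem.List.pyRange 0 4 1 = [(0:Int), 1, 2, 3] := by decide
  have hslice : ∀ {α : Type} (a b c d : α) (t : List α),
      PySem.List.slice (a :: b :: c :: d :: t) none (some 4) = [a, b, c, d] := by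
    intro α a b c d t
    simp [pysem]
  simp only [csF4_fst, csF4_snd, hr4, hslice, List.map_cons, List.map_nil, List.any_cons,
    List.any_nil, Bool.or_false, colL, rowL, ag, pyGetD0, pyGetD1, pyGetD2, pyGetD3,
    List.nil_append, keyRev, keyLo]
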